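-- pv_equiv track=rewrite | github.com/staffanosp/Advent-of-Code | 2023/python/Day-02/Day_02.py | solution02
-- ===== SOURCE A (Python) =====
-- def multiply(list):
--     product = 1
--     for number in list:
--         product *= number
--     return product
--
-- def solution02(input_data):
--     game_powers = []
--
--     for game in input_data:
--         min_required = {"red": 0, "green": 0, "blue": 0}
--
--         for subset in game:
--             for color, n in subset:
--                 min_required[color] = max(min_required[color], n)
--
--         game_powers.append(multiply(min_required.values()))
--
--     return sum(game_powers)
-- ===== SOURCE B (Python) =====
-- def solution02(input_data):
--     total = 0
--     for game in input_data:
--         # seed each color with 0, flatten the game, sort descending by count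
--         pairs = [("red", 0), ("green", 0), ("blue", 0)]
--         for subset in game:
--             pairs += subset
--         pairs = sorted(pairs, key=lambda p: p[1], reverse=True)
--         # first occurrence of each color in the descending order is its maximum
--         need = {"red": None, "green": None, "blue": None}
--         for color, n in pairs:
--             if need[color] is None:
--                 need[color] = n
--         total += need["red"] * need["green"] * need["blue"]
--     return total
-- ===== Notes on version B (the rewrite author's own statement) =====
-- stated objective: alternative
-- what changed: B replaces A's one-pass running per-color-maximum dict (and its multiply helper and deferred list of powers) with a sort-based algorithm: per game it flattens the subsets seeded with one 0 per color, sorts the pairs by count descending, and fills a fixed-key slot dict with the first-seen value per color (= that color's maximum), multiplying the three into a running total.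
import Mathlib
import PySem

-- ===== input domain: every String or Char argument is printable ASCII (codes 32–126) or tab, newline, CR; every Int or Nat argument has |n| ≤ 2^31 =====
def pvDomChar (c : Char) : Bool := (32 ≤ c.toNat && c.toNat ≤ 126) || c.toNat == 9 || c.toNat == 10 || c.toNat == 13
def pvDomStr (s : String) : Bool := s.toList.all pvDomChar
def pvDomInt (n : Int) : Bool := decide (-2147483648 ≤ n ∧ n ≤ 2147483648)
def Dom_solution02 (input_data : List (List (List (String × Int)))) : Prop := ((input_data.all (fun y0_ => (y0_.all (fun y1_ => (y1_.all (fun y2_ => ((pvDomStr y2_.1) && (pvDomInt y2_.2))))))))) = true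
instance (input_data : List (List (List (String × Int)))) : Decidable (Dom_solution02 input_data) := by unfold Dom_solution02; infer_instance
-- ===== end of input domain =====

-- B replaces A's running per-color-maximum dict with a sort-based algorithm: per game it
-- flattens the subsets (seeded with a 0 for each color), sorts the pairs by count in
-- descending order, and takes the FIRST-SEEN value per color (= that color's maximum),
-- multiplying the three into a running total (objective: alternative).

-- ===== PORT A =====
def pvMultiply (list : List Int) : Int :=
  list.foldl (fun product number => product * number) 1

-- 'min_required[color] = max(min_required[color], n)' is ported as Dict.modify with default 0;
-- this is exact whenever the key is present, which Pre_ guarantees (otherwise Python raises KeyError).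
def solution02 (input_data : List (List (List (String × Int)))) : Int :=
  (input_data.foldl (fun game_powers game =>
    game_powers ++ [pvMultiply (PySem.Dict.values
      (game.foldl (fun min_required subset =>
        subset.foldl (fun min_required p =>
          min_required.modify p.1 0 (fun v => max v p.2)) min_required)
        (PySem.Dict.ofList [("red", 0), ("green", 0), ("blue", 0)])))]) []).sum

-- ===== PORT B =====
-- the None-slot dict is ported with Option Int values; 'need[color]' / 'need["red"]' are
-- ported as getD with default none (exact whenever the key is present, which Pre_
-- guarantees — on an unknown color Python raises KeyError), and the final '.getD 0' on the
-- Option is exact because the three seed pairs leave no slot at None inside Pre_.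
def solution02_alt (input_data : List (List (List (String × Int)))) : Int :=
  input_data.foldl (fun total game =>
    let pairs := game.foldl (fun pairs subset => pairs ++ subset)
      [("red", 0), ("green", 0), ("blue", 0)]
    let pairs' := PySem.List.sorted pairs (fun p => p.2) true
    let need := pairs'.foldl (fun need p =>
        if need.getD p.1 none = none then need.insert p.1 (some p.2) else need)
      (PySem.Dict.ofList [("red", (none : Option Int)), ("green", none), ("blue", none)])
    total + (need.getD "red" none).getD 0 * (need.getD "green" none).getD 0 *
      (need.getD "blue" none).getD 0) 0

-- ===== PRECONDITION & SPEC =====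
-- Pre_ excludes exactly the inputs on which A raises KeyError: a pair whose color
-- name is not one of the three keys of A's dict.
def Pre_solution02 (input_data : List (List (List (String × Int)))) : Prop :=
  (input_data.all (fun game => game.all (fun subset => subset.all (fun p =>
    p.1 == "red" || p.1 == "green" || p.1 == "blue")))) = true
instance (input_data : List (List (List (String × Int)))) : Decidable (Pre_solution02 input_data) := by unfold Pre_solution02; infer_instance

def pvWitness_solution02 : (List (List (List (String × Int)))) :=
  [[[("red", 4), ("blue", 3)], [("green", 2)]], [[("blue", 1), ("blue", 5)]]]

def Spec_solution02 (input_data : List (List (List (String × Int)))) (out : Int) : Prop := out = solution02_alt input_data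
instance (input_data : List (List (List (String × Int)))) (out : Int) : Decidable (Spec_solution02 input_data out) := by unfold Spec_solution02; infer_instance

-- ===== CLAIM (what is proved, stated in full; the proofs are below) =====
def Claim_equal_solution02 : Prop := ∀ (input_data : List (List (List (String × Int)))), Dom_solution02 input_data → Pre_solution02 input_data → Spec_solution02 input_data (solution02 input_data)
-- ===== LEMMAS AND PROOFS =====

-- A's dict update loop, read at one key: the running max over that key's values.
theorem pv_getD_loop (pairs : List (String × Int)) (d : PySem.Dict String Int) (c : String) :
    (pairs.foldl (fun d p => d.modify p.1 0 (fun v => max v p.2)) d).getD c 0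
      = ((pairs.filter (fun p => p.1 == c)).map (fun p => p.2)).foldl max (d.getD c 0) := by
  induction pairs generalizing d with
  | nil => simp
  | cons p t ih =>
    by_cases h : p.1 = c
    · simp [List.foldl, ih, h]
    · simp [List.foldl, ih, PySem.Dict.getD_modify, Ne.symm h, h]

-- A's dict update loop never adds a key when every updated key is already present.
theorem pv_keys_loop (pairs : List (String × Int)) (d : PySem.Dict String Int)
    (h : ∀ p ∈ pairs, d.contains p.1 = true) :
    (pairs.foldl (fun d p => d.modify p.1 0 (fun v => max v p.2)) d).keys = d.keys := by
  induction pairs generalizing d with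
  | nil => rfl
  | cons p t ih =>
    have hc : d.contains p.1 = true := h p (List.mem_cons_self)
    have hk : (d.modify p.1 0 (fun v => max v p.2)).keys = d.keys := by
      rw [PySem.Dict.keys_modify, PySem.Dict.keys_insert_of_contains _ _ hc]
    have ht : ∀ q ∈ t, (d.modify p.1 0 (fun v => max v p.2)).contains q.1 = true := by
      intro q hq
      rw [PySem.Dict.contains_modify]
      simp [h q (List.mem_cons_of_mem _ hq)]
    simpa [List.foldl, hk] using ih _ ht

-- B's slot-filling loop, read at one key: the FIRST pair with that key wins.
theorem pv_slot_loop (S : List (String × Int)) (d : PySem.Dict String (Option Int))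
    (c : String) :
    (S.foldl (fun d p =>
        if d.getD p.1 none = none then d.insert p.1 (some p.2) else d) d).getD c none
      = if d.getD c none = none then (S.find? (fun p => p.1 == c)).map (fun p => p.2)
        else d.getD c none := by
  induction S generalizing d with
  | nil => by_cases h : d.getD c none = none <;> simp [List.foldl, h]
  | cons p t ih =>
    simp only [List.foldl_cons, ih]
    by_cases hpc : p.1 = c
    · subst hpc
      rw [List.find?_cons_of_pos (by simp)]
      by_cases hd : d.getD p.1 none = none
      · rw [if_pos hd, if_pos hd, PySem.Dict.getD_insert_self,
            if_neg (by simp)]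
        rfl
      · rw [if_neg hd, if_neg hd, if_neg hd]
    · rw [List.find?_cons_of_neg (by simp [hpc])]
      by_cases hd : d.getD p.1 none = none
      · rw [if_pos hd, PySem.Dict.getD_insert_of_ne _ _ _ (Ne.symm hpc)]
      · rw [if_neg hd]

-- a running max does not move past an accumulator dominating the list
theorem pv_foldl_max_fix (l : List Int) (a : Int) (h : ∀ x ∈ l, x ≤ a) :
    l.foldl max a = a := by
  induction l with
  | nil => rfl
  | cons x t ih =>
    have hx : max a x = a := max_eq_left (h x List.mem_cons_self)
    simpa [List.foldl, hx] using ih (fun y hy => h y (List.mem_cons_of_mem _ hy))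

-- the running max from 0 is invariant under permutation of the list
theorem pv_foldl_max_perm (l l' : List Int) (h : l.Perm l') :
    l.foldl max 0 = l'.foldl max 0 := by
  have key : ∀ (u u' : List Int), u.Perm u' → u.foldl max 0 ≤ u'.foldl max 0 := by
    intro u u' hp
    rcases PySem.List.foldl_max_mem u 0 with h0 | hm
    · rw [h0]; exact (PySem.List.le_foldl_max u' 0).1
    · exact (PySem.List.le_foldl_max u' 0).2 _ ((List.Perm.mem_iff hp).mp hm)
  exact le_antisymm (key l l' h) (key l' l h.symm)

-- on a list sorted descending by second component that contains (c, 0), the first pair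
-- with key c carries the maximum (from 0) of all values at key c
theorem pv_find_max (S : List (String × Int)) (c : String)
    (hpair : S.Pairwise (fun a b => b.2 ≤ a.2))
    (h0 : (c, 0) ∈ S) :
    ((S.find? (fun p => p.1 == c)).map (fun p => p.2)).getD 0
      = ((S.filter (fun p => p.1 == c)).map (fun p => p.2)).foldl max 0 := by
  have hmem : (c, 0) ∈ S.filter (fun p => p.1 == c) := by
    simp [List.mem_filter, h0]
  rcases hne : S.filter (fun p => p.1 == c) with _ | ⟨p, t⟩
  · rw [hne] at hmem; cases hmem
  · have hfind : S.find? (fun p => p.1 == c) = some p := by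
      rw [← List.head?_filter, hne]; rfl
    have hpt : ∀ q ∈ t, q.2 ≤ p.2 := by
      have := (List.Pairwise.filter (fun p => p.1 == c) hpair)
      rw [hne] at this
      exact fun q hq => (List.pairwise_cons.mp this).1 q hq
    have hp0 : 0 ≤ p.2 := by
      rw [hne] at hmem
      rcases List.mem_cons.mp hmem with h | h
      · rw [← h]
      · simpa using hpt _ h
    have : (t.map (fun p => p.2)).foldl max p.2 = p.2 :=
      pv_foldl_max_fix _ _ (by
        intro x hx
        rcases List.mem_map.mp hx with ⟨q, hq, rfl⟩
        exact hpt q hq)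
    rw [hfind, hne]
    simp only [Option.map_some, Option.getD_some, List.map_cons, List.foldl_cons]
    rw [max_eq_right hp0, this]

-- Per game, A's dict-and-multiply power equals B's sort-then-first-seen power.
theorem pv_game_power (game : List (List (String × Int)))
    (hg : game.all (fun subset => subset.all (fun p =>
      p.1 == "red" || p.1 == "green" || p.1 == "blue")) = true) :
    pvMultiply (PySem.Dict.values
      (game.foldl (fun min_required subset =>
        subset.foldl (fun min_required p =>
          min_required.modify p.1 0 (fun v => max v p.2)) min_required)
        (PySem.Dict.ofList [("red", 0), ("green", 0), ("blue", 0)])))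
      = (let pairs := game.foldl (fun pairs subset => pairs ++ subset)
            [("red", 0), ("green", 0), ("blue", 0)]
         let pairs' := PySem.List.sorted pairs (fun p => p.2) true
         let need := pairs'.foldl (fun need p =>
             if need.getD p.1 none = none then need.insert p.1 (some p.2) else need)
           (PySem.Dict.ofList [("red", (none : Option Int)), ("green", none), ("blue", none)])
         (need.getD "red" none).getD 0 * (need.getD "green" none).getD 0 *
           (need.getD "blue" none).getD 0) := by
  set d0 : PySem.Dict String Int := PySem.Dict.ofList [("red", 0), ("green", 0), ("blue", 0)] with hd0
  set seeds : List (String × Int) := [("red", 0), ("green", 0), ("blue", 0)] with hseeds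
  have hnestA : (game.foldl (fun min_required subset =>
      subset.foldl (fun min_required p =>
        min_required.modify p.1 0 (fun v => max v p.2)) min_required) d0)
      = game.flatten.foldl (fun d p => d.modify p.1 0 (fun v => max v p.2)) d0 :=
    List.foldl_flatten.symm
  have hmem : ∀ p ∈ game.flatten, d0.contains p.1 = true := by
    intro p hp
    rcases List.mem_flatten.mp hp with ⟨s, hs, hps⟩
    have := List.all_eq_true.mp (List.all_eq_true.mp hg s hs) p hps
    rcases Bool.or_eq_true_iff.mp this with h | h
    · rcases Bool.or_eq_true_iff.mp h with h' | h'
      · rw [show p.1 = "red" from by simpa using h']; decide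
      · rw [show p.1 = "green" from by simpa using h']; decide
    · rw [show p.1 = "blue" from by simpa using h]; decide
  rw [hnestA]
  set F := game.flatten.foldl (fun d p => d.modify p.1 0 (fun v => max v p.2)) d0 with hF
  have hkeys : F.keys = ["red", "green", "blue"] := by
    rw [hF, pv_keys_loop _ _ hmem]; decide
  have hvals : F.values = [F.getD "red" 0, F.getD "green" 0, F.getD "blue" 0] := by
    rw [PySem.Dict.values_eq_map_keys F (by rw [hkeys]; decide) 0, hkeys]; rfl
  -- B's list of pairs and its sort
  have hpairs : game.foldl (fun pairs subset => pairs ++ subset) seeds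
      = seeds ++ game.flatten := PySem.List.foldl_append_eq_flatten game seeds
  simp only [hpairs]
  set L : List (String × Int) := seeds ++ game.flatten with hL
  set S := PySem.List.sorted L (fun p => p.2) true with hS
  have hperm : S.Perm L := PySem.List.sorted_perm L (fun p => p.2) true
  have hpair : S.Pairwise (fun a b => b.2 ≤ a.2) :=
    PySem.List.sorted_pairwise_rev L (fun p => p.2)
  -- the three per-color values agree
  have hcolor : ∀ c : String, (c, (0 : Int)) ∈ seeds → d0.getD c 0 = 0 →
      (PySem.Dict.ofList [("red", (none : Option Int)), ("green", none), ("blue", none)]).getD c none = none →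
      ((S.foldl (fun need p =>
          if need.getD p.1 none = none then need.insert p.1 (some p.2) else need)
        (PySem.Dict.ofList [("red", (none : Option Int)), ("green", none), ("blue", none)])).getD c none).getD 0
        = F.getD c 0 := by
    intro c hcs hc0 hslot
    have hc0mem : (c, (0 : Int)) ∈ S :=
      (List.Perm.mem_iff hperm).mpr (List.mem_append.mpr (Or.inl hcs))
    rw [pv_slot_loop, if_pos hslot]
    rw [show ((S.find? (fun p => p.1 == c)).map (fun p => p.2)).getD 0
          = ((S.filter (fun p => p.1 == c)).map (fun p => p.2)).foldl max 0
        from pv_find_max S c hpair hc0mem]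
    have hfperm : ((S.filter (fun p => p.1 == c)).map (fun p => p.2)).Perm
        ((L.filter (fun p => p.1 == c)).map (fun p => p.2)) :=
      List.Perm.map _ (List.Perm.filter _ hperm)
    rw [pv_foldl_max_perm _ _ hfperm]
    have hsplit : L.filter (fun p => p.1 == c)
        = seeds.filter (fun p => p.1 == c) ++ game.flatten.filter (fun p => p.1 == c) :=
      List.filter_append _ _
    rw [hF, pv_getD_loop, hc0]
    rw [hsplit, List.map_append]
    -- seeds contribute exactly one (c, 0) pair for each of the three colors
    have hseedf : (seeds.filter (fun p => p.1 == c)).map (fun p => p.2) = [0] := by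
      have hc3 := hcs
      rw [hseeds] at hc3
      simp only [List.mem_cons, List.not_mem_nil, or_false, Prod.mk.injEq] at hc3
      rw [hseeds]
      rcases hc3 with ⟨h, -⟩ | ⟨h, -⟩ | ⟨h, -⟩ <;> subst h <;> decide
    rw [hseedf]
    simp
  rw [hvals]
  rw [hcolor "red" (by decide) (by decide) (by decide),
      hcolor "green" (by decide) (by decide) (by decide),
      hcolor "blue" (by decide) (by decide) (by decide)]
  simp [pvMultiply, mul_assoc]

-- ===== VERDICT (by name: the statement is the Claim_ definition above) =====
theorem solution02_spec : Claim_equal_solution02 := by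
  intro input_data _ hpre
  unfold Spec_solution02 solution02 solution02_alt
  rw [PySem.List.foldl_append_singleton_eq_map, List.nil_append, PySem.List.foldl_add,
      Int.zero_add]
  congr 1
  apply List.map_congr_left
  intro game hgame
  exact pv_game_power game (List.all_eq_true.mp hpre game hgame)
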